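-- pv_equiv track=rewrite | github.com/sharmanihal/PractiseProblems | Python Problems/MinimumNumberOfDaysToMakeMBoquote.py | isValidScheme
-- ===== SOURCE A (Python) =====
-- def isValidScheme(bloomDay,mid,b,f):
--     boq=0
--     flower=0
--
--     for i in range(len(bloomDay)):
--         if bloomDay[i]<=mid:
--             flower=flower+1
--         if bloomDay[i]>mid:
--             flower=0
--         if flower==f:
--             boq=boq+1
--             flower=0
--     if boq>=b:
--         return True
--     else:
--         return False
-- ===== SOURCE B (Python) =====
-- def isValidScheme(bloomDay, mid, b, f):
--     # Decompose into maximal runs of blooming flowers; each run of length L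
--     # yields L // f bouquets.  (Requires f >= 1.)
--     total = 0
--     i = 0
--     n = len(bloomDay)
--     while i < n:
--         j = i
--         while j < n and bloomDay[j] <= mid:
--             j += 1
--         total += (j - i) // f
--         i = j + 1
--     return total >= b
-- ===== Notes on version B (the rewrite author's own statement) =====
-- stated objective: alternative
-- what changed: B splits bloomDay into maximal runs of flowers blooming by day mid and adds run_length // f per run, instead of A's per-element increment/reset/compare state machine.
-- outside the precondition, e.g. on isValidScheme([5], 3, 1, 0): A returns True, B raises ZeroDivisionError; on isValidScheme([1], 3, 0, -1): A returns True, B returns False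
import Mathlib
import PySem

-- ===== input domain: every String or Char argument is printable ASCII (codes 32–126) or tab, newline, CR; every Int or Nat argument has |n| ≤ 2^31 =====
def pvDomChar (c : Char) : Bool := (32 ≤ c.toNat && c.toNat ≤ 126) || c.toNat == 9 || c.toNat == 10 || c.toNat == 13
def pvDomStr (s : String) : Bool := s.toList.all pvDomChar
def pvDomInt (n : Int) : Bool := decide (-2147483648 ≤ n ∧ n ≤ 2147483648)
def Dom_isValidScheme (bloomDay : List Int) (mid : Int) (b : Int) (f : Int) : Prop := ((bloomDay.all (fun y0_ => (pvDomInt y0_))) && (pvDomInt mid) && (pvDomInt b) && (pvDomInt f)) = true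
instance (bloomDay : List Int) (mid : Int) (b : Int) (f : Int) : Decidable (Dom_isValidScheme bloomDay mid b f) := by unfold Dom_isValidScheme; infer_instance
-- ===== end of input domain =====

-- B replaces A's per-element increment/reset state machine by a run-decomposition:
-- each maximal run of flowers with bloomDay ≤ mid of length L contributes L // f bouquets (alternative decomposition, f ≥ 1).


-- ===== PORT A =====
-- literal transliteration of A: fold over the flowers in order, keeping (boq, flower);
-- pvStepA is the loop body — the three ifs in source order.
def pvStepA (mid f : Int) (s : Int × Int) (d : Int) : Int × Int :=
  let flower := if d ≤ mid then s.2 + 1 else s.2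
  let flower := if mid < d then 0 else flower
  if flower = f then (s.1 + 1, 0) else (s.1, flower)

def isValidScheme (bloomDay : List Int) (mid : Int) (b : Int) (f : Int) : Bool :=
  let st := bloomDay.foldl (pvStepA mid f) ((0 : Int), (0 : Int))
  if b ≤ st.1 then true else false

-- ===== PORT B =====
-- transliteration of B's run-skipping loop as recursion on the remaining suffix:
-- the inner while computes the length j - i of the leading blooming run (takeWhile),
-- the outer step adds run // f and resumes after the first non-blooming flower (drop (run+1)).
def pvCountRuns (mid f : Int) (xs : List Int) : Int :=
  match xs with
  | [] => 0
  | d :: t =>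
    let run := ((d :: t).takeWhile (fun x => decide (x ≤ mid))).length
    PySem.Int.floordiv (run : Int) f + pvCountRuns mid f ((d :: t).drop (run + 1))
  termination_by xs.length
  decreasing_by simp [List.length_drop]

def isValidScheme_alt (bloomDay : List Int) (mid : Int) (b : Int) (f : Int) : Bool :=
  decide (b ≤ pvCountRuns mid f bloomDay)

-- ===== PRECONDITION & SPEC =====
-- Pre_ excludes non-positive f (flowers per bouquet), a degenerate input outside the
-- function's purpose: there B's floor division raises (f = 0) or yields negative bouquet
-- counts (f < 0), while A's per-element equality test returns accidental values.
def Pre_isValidScheme (bloomDay : List Int) (mid : Int) (b : Int) (f : Int) : Prop := 1 ≤ f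
instance (bloomDay : List Int) (mid : Int) (b : Int) (f : Int) : Decidable (Pre_isValidScheme bloomDay mid b f) := by unfold Pre_isValidScheme; infer_instance
def pvWitness_isValidScheme : List Int × Int × Int × Int := ([1, 5, 2, 2], 3, 1, 2)
def Spec_isValidScheme (bloomDay : List Int) (mid : Int) (b : Int) (f : Int) (out : Bool) : Prop := out = isValidScheme_alt bloomDay mid b f
instance (bloomDay : List Int) (mid : Int) (b : Int) (f : Int) (out : Bool) : Decidable (Spec_isValidScheme bloomDay mid b f out) := by unfold Spec_isValidScheme; infer_instance

-- ===== CLAIM (what is proved, stated in full; the proofs are below) =====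
def Claim_equal_isValidScheme : Prop := ∀ (bloomDay : List Int) (mid : Int) (b : Int) (f : Int), Dom_isValidScheme bloomDay mid b f → Pre_isValidScheme bloomDay mid b f → Spec_isValidScheme bloomDay mid b f (isValidScheme bloomDay mid b f)

-- ===== LEMMAS AND PROOFS =====

-- middle characterisation: bouquets contributed by the rest of the list when the
-- current run already holds r flowers
def pvT (mid : Int) (fn : Nat) (r : Nat) : List Int → Nat
  | [] => r / fn
  | d :: l => if d ≤ mid then pvT mid fn (r + 1) l else r / fn + pvT mid fn 0 l

theorem pv_succ_div_mod_hit (fn r : Nat) (hf : 1 ≤ fn) (h : r % fn + 1 = fn) :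
    (r + 1) / fn = r / fn + 1 ∧ (r + 1) % fn = 0 := by
  have hdm := Nat.mod_add_div r fn
  have key : r + 1 = fn * (r / fn + 1) := by rw [Nat.mul_succ]; omega
  constructor
  · rw [key, Nat.mul_div_cancel_left _ (by omega : 0 < fn)]
  · rw [key]; exact Nat.mul_mod_right fn _
theorem pv_succ_div_mod_miss (fn r : Nat) (hf : 1 ≤ fn) (h : r % fn + 1 ≠ fn) :
    (r + 1) / fn = r / fn ∧ (r + 1) % fn = r % fn + 1 := by
  have hlt : r % fn < fn := Nat.mod_lt _ hf
  have hdm := Nat.mod_add_div r fn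
  have key : r + 1 = fn * (r / fn) + (r % fn + 1) := by omega
  constructor
  · rw [key, Nat.mul_add_div (by omega : 0 < fn), Nat.div_eq_of_lt (by omega : r % fn + 1 < fn)]
    omega
  · rw [key, Nat.mul_add_mod, Nat.mod_eq_of_lt (by omega)]

theorem pvA_fold (mid : Int) (fn : Nat) (hf : 1 ≤ fn) :
    ∀ (l : List Int) (boq : Int) (r : Nat),
      (l.foldl (pvStepA mid (fn : Int)) (boq, ((r % fn : Nat) : Int))).1
      = boq + ((pvT mid fn r l : Nat) : Int) - ((r / fn : Nat) : Int) := by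
  intro l
  induction l with
  | nil => intro boq r; simp [pvT]
  | cons d l ih =>
    intro boq r
    rw [List.foldl_cons]
    by_cases hd : d ≤ mid
    · have hlt : ¬ mid < d := not_lt.mpr hd
      by_cases hhit : r % fn + 1 = fn
      · obtain ⟨hdiv, hmod⟩ := pv_succ_div_mod_hit fn r hf hhit
        have hcond : ((r : Int) % (fn : Int) + 1 = (fn : Int)) := by exact_mod_cast hhit
        have hstep : pvStepA mid (fn : Int) (boq, ((r % fn : Nat) : Int)) d
            = (boq + 1, (((r + 1) % fn : Nat) : Int)) := by
          simp [pvStepA, hd, hlt, hcond, hmod]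
        rw [hstep, ih (boq + 1) (r + 1), hdiv]
        simp only [pvT, if_pos hd]
        push_cast; ring
      · obtain ⟨hdiv, hmod⟩ := pv_succ_div_mod_miss fn r hf hhit
        have hne : ¬ ((r : Int) % (fn : Int) + 1 = (fn : Int)) := by
          intro hx; exact hhit (by exact_mod_cast hx)
        have hstep : pvStepA mid (fn : Int) (boq, ((r % fn : Nat) : Int)) d
            = (boq, (((r + 1) % fn : Nat) : Int)) := by
          simp [pvStepA, hd, hlt, hne, hmod]
        rw [hstep, ih boq (r + 1), hdiv]
        simp only [pvT, if_pos hd]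
    · have hlt : mid < d := not_le.mp hd
      have hne0 : (0 : Int) ≠ ((fn : Nat) : Int) := by exact_mod_cast (by omega : (0 : Nat) ≠ fn)
      have hstep : pvStepA mid (fn : Int) (boq, ((r % fn : Nat) : Int)) d
          = (boq, (((0 % fn : Nat) : Nat) : Int)) := by
        simp [pvStepA, hd, hlt, hne0, Nat.zero_mod]
      rw [hstep, ih boq 0]
      simp only [pvT, if_neg hd, Nat.zero_div, Nat.cast_zero]
      push_cast
      omega

-- unfolding equations for the well-founded pvCountRuns
theorem pvCountRuns_nil (mid f : Int) : pvCountRuns mid f [] = 0 := by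
  unfold pvCountRuns
  rfl
theorem pvCountRuns_cons (mid f d : Int) (t : List Int) :
    pvCountRuns mid f (d :: t)
      = PySem.Int.floordiv ((((d :: t).takeWhile (fun x => decide (x ≤ mid))).length : Nat) : Int) f
        + pvCountRuns mid f ((d :: t).drop (((d :: t).takeWhile (fun x => decide (x ≤ mid))).length + 1)) := by
  conv_lhs => unfold pvCountRuns

theorem pvT_take (mid : Int) (fn : Nat) :
    ∀ (xs : List Int) (r : Nat),
      pvT mid fn r xs =
        (r + (xs.takeWhile (fun x => decide (x ≤ mid))).length) / fn +
        (match xs.dropWhile (fun x => decide (x ≤ mid)) with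
         | [] => 0
         | _ :: rest => pvT mid fn 0 rest) := by
  intro xs
  induction xs with
  | nil => intro r; simp [pvT]
  | cons d l ih =>
    intro r
    by_cases hd : d ≤ mid
    · have hstep : pvT mid fn r (d :: l) = pvT mid fn (r + 1) l := by
        simp [pvT, hd]
      rw [hstep, ih (r + 1)]
      simp [List.takeWhile_cons, List.dropWhile_cons, hd]
      have : r + 1 + (l.takeWhile (fun x => decide (x ≤ mid))).length
           = r + ((l.takeWhile (fun x => decide (x ≤ mid))).length + 1) := by omega
      rw [this]
    · simp only [pvT, if_neg hd]
      simp [List.takeWhile_cons, List.dropWhile_cons, hd]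

theorem pvCountRuns_eq (mid : Int) (fn : Nat) (hf : 1 ≤ fn) :
    ∀ (n : Nat) (xs : List Int), xs.length ≤ n →
      pvCountRuns mid (fn : Int) xs = ((pvT mid fn 0 xs : Nat) : Int) := by
  intro n
  induction n with
  | zero =>
    intro xs h
    have hxs : xs = [] := List.eq_nil_of_length_eq_zero (by omega)
    subst hxs
    simp [pvCountRuns_nil, pvT]
  | succ n ih =>
    intro xs h
    match xs with
    | [] => simp [pvCountRuns_nil, pvT]
    | d :: l =>
      rw [pvCountRuns_cons]
      set p : Int → Bool := fun x => decide (x ≤ mid) with hp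
      have hsplit : (d :: l).takeWhile p ++ (d :: l).dropWhile p = d :: l :=
        List.takeWhile_append_dropWhile
      set L := ((d :: l).takeWhile p).length with hL
      have hdrop : (d :: l).drop L = (d :: l).dropWhile p := by
        conv_lhs => rw [← hsplit]
        rw [List.drop_left' hL.symm]
      have hdrop1 : (d :: l).drop (L + 1) = ((d :: l).dropWhile p).drop 1 := by
        rw [← List.drop_drop, hdrop]
      have htake := pvT_take mid fn (d :: l) 0
      rw [← hp, ← hL] at htake
      have hfd : PySem.Int.floordiv ((L : Nat) : Int) ((fn : Nat) : Int) = ((L / fn : Nat) : Int) :=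
        PySem.Int.floordiv_natCast L fn
      cases hdw : (d :: l).dropWhile p with
      | nil =>
        rw [hdrop1, hdw]
        simp only [List.drop_nil, pvCountRuns_nil, add_zero]
        rw [htake, hdw]
        simp [hfd]
      | cons e rest =>
        rw [hdrop1, hdw]
        simp only [List.drop_succ_cons, List.drop_zero]
        have hlen : rest.length ≤ n := by
          have := congrArg List.length hsplit
          simp only [List.length_append, hdw, List.length_cons] at this
          simp only [List.length_cons] at h
          omega
        rw [ih rest hlen, htake, hdw]
        simp [hfd]

-- ===== VERDICT (by name: the statement is the Claim_ definition above) =====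
theorem isValidScheme_spec : Claim_equal_isValidScheme := by
  intro bloomDay mid b f _ hpre
  unfold Spec_isValidScheme isValidScheme isValidScheme_alt
  have hf1 : (1 : Int) ≤ f := hpre
  have hff : f = ((f.toNat : Nat) : Int) := by omega
  have hfge : 1 ≤ f.toNat := by omega
  rw [hff, pvCountRuns_eq mid f.toNat hfge bloomDay.length bloomDay le_rfl]
  have hfold := pvA_fold mid f.toNat hfge bloomDay 0 0
  simp only [Nat.zero_mod, Nat.cast_zero, Nat.zero_div] at hfold
  simp only [hfold]
  simp
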